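-- pv_equiv track=rewrite | github.com/virajvekaria/curse-2.0 | core/intelligent_augment_engine.py | _fallback_complexity_estimation
-- ===== SOURCE A (Python) =====
-- def _fallback_complexity_estimation(prompt: str) -> int:
--     """Fallback complexity estimation when LLM fails."""
--     prompt_lower = prompt.lower()
--     base_complexity = 3
--
--     # Simple heuristic based on keywords
--     if any(term in prompt_lower for term in ['neural', 'machine learning', 'ai']):
--         base_complexity = 8
--     elif any(term in prompt_lower for term in ['web scraping', 'api', 'database']):
--         base_complexity = 6
--     elif any(term in prompt_lower for term in ['game', 'gui', 'visualization']):
--         base_complexity = 6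
--     elif any(term in prompt_lower for term in ['algorithm', 'sort', 'search']):
--         base_complexity = 5
--     elif any(term in prompt_lower for term in ['data', 'csv', 'json']):
--         base_complexity = 4
--
--     # Adjust for prompt length and detail
--     if len(prompt) > 100:
--         base_complexity += 1
--     if len(prompt.split()) > 15:
--         base_complexity += 1
--
--     return min(base_complexity, 10)
-- ===== SOURCE B (Python) =====
-- _KEYWORD_SCORES = [
--     ('neural', 8), ('machine learning', 8), ('ai', 8),
--     ('web scraping', 6), ('api', 6), ('database', 6),
--     ('game', 6), ('gui', 6), ('visualization', 6),
--     ('algorithm', 5), ('sort', 5), ('search', 5),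
--     ('data', 4), ('csv', 4), ('json', 4),
-- ]
--
--
-- def _fallback_complexity_estimation(prompt: str) -> int:
--     """Fallback complexity estimation when LLM fails."""
--     p = prompt.lower()
--     score = max((s for k, s in _KEYWORD_SCORES if k in p), default=3)
--     if len(prompt) > 100:
--         score += 1
--     if len(prompt.split()) > 15:
--         score += 1
--     return min(score, 10)
-- ===== Notes on version B (the rewrite author's own statement) =====
-- stated objective: simpler
-- what changed: Replaces the if/elif keyword-group cascade with a single max over a flat keyword->score table (correct because the cascade's scores are non-increasing, so first match equals best match).
import Mathlib
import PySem

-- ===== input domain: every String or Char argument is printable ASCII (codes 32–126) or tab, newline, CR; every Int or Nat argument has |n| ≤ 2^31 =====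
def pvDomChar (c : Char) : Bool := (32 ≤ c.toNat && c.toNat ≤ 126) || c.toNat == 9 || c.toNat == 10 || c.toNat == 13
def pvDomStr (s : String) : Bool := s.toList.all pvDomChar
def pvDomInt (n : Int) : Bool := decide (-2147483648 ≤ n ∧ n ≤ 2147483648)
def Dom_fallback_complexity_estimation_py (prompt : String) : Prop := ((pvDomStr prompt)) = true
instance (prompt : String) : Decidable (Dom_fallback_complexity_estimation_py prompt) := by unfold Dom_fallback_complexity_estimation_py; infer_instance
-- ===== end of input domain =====

-- B replaces A's if/elif cascade by a single max over a flat keyword→score table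
-- (valid because the cascade's scores are non-increasing, so first match = best match): simpler.


-- ===== PORT A =====
def fallback_complexity_estimation_py (prompt : String) : Int :=
  let pl := PySem.Str.lower prompt
  let base : Int :=
    if PySem.Str.isIn "neural" pl || PySem.Str.isIn "machine learning" pl || PySem.Str.isIn "ai" pl then 8
    else if PySem.Str.isIn "web scraping" pl || PySem.Str.isIn "api" pl || PySem.Str.isIn "database" pl then 6
    else if PySem.Str.isIn "game" pl || PySem.Str.isIn "gui" pl || PySem.Str.isIn "visualization" pl then 6
    else if PySem.Str.isIn "algorithm" pl || PySem.Str.isIn "sort" pl || PySem.Str.isIn "search" pl then 5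
    else if PySem.Str.isIn "data" pl || PySem.Str.isIn "csv" pl || PySem.Str.isIn "json" pl then 4
    else 3
  let base := if PySem.Str.len prompt > 100 then base + 1 else base
  let base := if (PySem.Str.split₀ prompt).length > 15 then base + 1 else base
  min base 10

-- ===== PORT B =====
def pvKeywordScores : List (String × Int) :=
  [("neural", 8), ("machine learning", 8), ("ai", 8),
   ("web scraping", 6), ("api", 6), ("database", 6),
   ("game", 6), ("gui", 6), ("visualization", 6),
   ("algorithm", 5), ("sort", 5), ("search", 5),
   ("data", 4), ("csv", 4), ("json", 4)]

def fallback_complexity_estimation_py_alt (prompt : String) : Int :=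
  let p := PySem.Str.lower prompt
  let score :=
    PySem.List.maxD ((pvKeywordScores.filter (fun ks => PySem.Str.isIn ks.1 p)).map Prod.snd) (fun x => x) 3
  let score := if PySem.Str.len prompt > 100 then score + 1 else score
  let score := if (PySem.Str.split₀ prompt).length > 15 then score + 1 else score
  min score 10

-- ===== PRECONDITION & SPEC =====
def Spec_fallback_complexity_estimation_py (prompt : String) (out : Int) : Prop := out = fallback_complexity_estimation_py_alt prompt
instance (prompt : String) (out : Int) : Decidable (Spec_fallback_complexity_estimation_py prompt out) := by unfold Spec_fallback_complexity_estimation_py; infer_instance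

-- ===== CLAIM (what is proved, stated in full; the proofs are below) =====
def Claim_equal_fallback_complexity_estimation_py : Prop := ∀ (prompt : String), Dom_fallback_complexity_estimation_py prompt → Spec_fallback_complexity_estimation_py prompt (fallback_complexity_estimation_py prompt)

-- ===== LEMMAS AND PROOFS =====

-- values of the table entries whose flag is set (proof-side view of filter∘map)
def pvCollect : List (Bool × Int) → List Int
  | [] => []
  | (b, v) :: r => if b then v :: pvCollect r else pvCollect r

theorem pvCollect_filter_map {α : Type} (q : α × Int → Bool) (tbl : List (α × Int)) :
    (tbl.filter q).map Prod.snd = pvCollect (tbl.map (fun ks => (q ks, ks.2))) := by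
  induction tbl with
  | nil => rfl
  | cons a t ih =>
    simp only [List.filter_cons, List.map_cons, pvCollect]
    cases h : q a <;> simp [ih]

theorem pvCollect_mem {x : Int} {bs : List (Bool × Int)} (h : x ∈ pvCollect bs) :
    ∃ b, (b, x) ∈ bs := by
  induction bs with
  | nil => simp [pvCollect] at h
  | cons a t ih =>
    obtain ⟨b, v⟩ := a
    cases b <;> simp only [pvCollect, if_true, if_false, Bool.false_eq_true, List.mem_cons] at h
    · rcases ih h with ⟨c, hc⟩
      exact ⟨c, List.mem_cons_of_mem _ hc⟩
    · rcases h with h | h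
      · exact ⟨true, by simp [h]⟩
      · rcases ih h with ⟨c, hc⟩
        exact ⟨c, List.mem_cons_of_mem _ hc⟩

theorem pv_maxD_eq_foldl (xs : List Int) (d : Int) (h : ∀ x ∈ xs, d ≤ x) :
    PySem.List.maxD xs (fun x => x) d = xs.foldl max d := by
  cases xs with
  | nil => rfl
  | cons a t =>
    have ha : d ≤ a := h a (by simp)
    show Option.getD (PySem.List.max? (a :: t) (fun x => x)) d = (a :: t).foldl max d
    rw [PySem.List.max?_id_cons, Option.getD_some, List.foldl_cons, max_eq_right ha]

theorem pv_group3 (v acc : Int) (b c d : Bool) (l : List (Bool × Int)) :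
    (pvCollect ((b, v) :: (c, v) :: (d, v) :: l)).foldl max acc
      = (pvCollect l).foldl max (if b || c || d then max acc v else acc) := by
  cases b <;> cases c <;> cases d <;>
    simp [pvCollect, List.foldl]

theorem pv_cascade (g1 g2 g3 g4 g5 : Bool) :
    (if g1 then (8 : Int)
     else if g2 then 6
     else if g3 then 6
     else if g4 then 5
     else if g5 then 4
     else 3)
    = (if g5 then
         max (if g4 then
                max (if g3 then
                       max (if g2 then
                              max (if g1 then max 3 8 else 3) 6
                            else if g1 then max 3 8 else 3) 6
                     else if g2 then
                            max (if g1 then max 3 8 else 3) 6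
                          else if g1 then max 3 8 else 3) 5
              else if g3 then
                     max (if g2 then
                            max (if g1 then max 3 8 else 3) 6
                          else if g1 then max 3 8 else 3) 6
                   else if g2 then
                          max (if g1 then max 3 8 else 3) 6
                        else if g1 then max 3 8 else 3) 4
       else if g4 then
              max (if g3 then
                     max (if g2 then
                            max (if g1 then max 3 8 else 3) 6
                          else if g1 then max 3 8 else 3) 6
                   else if g2 then
                          max (if g1 then max 3 8 else 3) 6
                        else if g1 then max 3 8 else 3) 5
            else if g3 then
                   max (if g2 then
                          max (if g1 then max 3 8 else 3) 6
                        else if g1 then max 3 8 else 3) 6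
                 else if g2 then
                        max (if g1 then max 3 8 else 3) 6
                      else if g1 then max 3 8 else 3) := by
  cases g1 <;> cases g2 <;> cases g3 <;> cases g4 <;> cases g5 <;> decide

theorem pv_base_eq (p : String) :
    (if PySem.Str.isIn "neural" p || PySem.Str.isIn "machine learning" p || PySem.Str.isIn "ai" p then (8 : Int)
     else if PySem.Str.isIn "web scraping" p || PySem.Str.isIn "api" p || PySem.Str.isIn "database" p then 6
     else if PySem.Str.isIn "game" p || PySem.Str.isIn "gui" p || PySem.Str.isIn "visualization" p then 6
     else if PySem.Str.isIn "algorithm" p || PySem.Str.isIn "sort" p || PySem.Str.isIn "search" p then 5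
     else if PySem.Str.isIn "data" p || PySem.Str.isIn "csv" p || PySem.Str.isIn "json" p then 4
     else 3)
    = PySem.List.maxD ((pvKeywordScores.filter (fun ks => PySem.Str.isIn ks.1 p)).map Prod.snd) (fun x => x) 3 := by
  rw [pvCollect_filter_map]
  simp only [pvKeywordScores, List.map_cons, List.map_nil]
  rw [pv_maxD_eq_foldl]
  · rw [pv_group3, pv_group3, pv_group3, pv_group3, pv_group3]
    simp only [pvCollect, List.foldl]
    generalize PySem.Str.isIn "neural" p = b1
    generalize PySem.Str.isIn "machine learning" p = b2
    generalize PySem.Str.isIn "ai" p = b3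
    generalize PySem.Str.isIn "web scraping" p = b4
    generalize PySem.Str.isIn "api" p = b5
    generalize PySem.Str.isIn "database" p = b6
    generalize PySem.Str.isIn "game" p = b7
    generalize PySem.Str.isIn "gui" p = b8
    generalize PySem.Str.isIn "visualization" p = b9
    generalize PySem.Str.isIn "algorithm" p = b10
    generalize PySem.Str.isIn "sort" p = b11
    generalize PySem.Str.isIn "search" p = b12
    generalize PySem.Str.isIn "data" p = b13
    generalize PySem.Str.isIn "csv" p = b14
    generalize PySem.Str.isIn "json" p = b15
    generalize (b1 || b2 || b3 : Bool) = g1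
    generalize (b4 || b5 || b6 : Bool) = g2
    generalize (b7 || b8 || b9 : Bool) = g3
    generalize (b10 || b11 || b12 : Bool) = g4
    generalize (b13 || b14 || b15 : Bool) = g5
    exact pv_cascade g1 g2 g3 g4 g5
  · intro x hx
    rcases pvCollect_mem hx with ⟨b, hb⟩
    simp only [List.mem_cons, List.not_mem_nil, or_false, Prod.mk.injEq] at hb
    omega

-- ===== VERDICT (by name: the statement is the Claim_ definition above) =====
theorem fallback_complexity_estimation_py_spec : Claim_equal_fallback_complexity_estimation_py := by
  intro prompt _
  unfold Spec_fallback_complexity_estimation_py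
  simp only [fallback_complexity_estimation_py, fallback_complexity_estimation_py_alt]
  rw [pv_base_eq (PySem.Str.lower prompt)]
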